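-- pv_equiv track=rewrite | github.com/rtindru/GoogleCodeJam2020 | moon_umbrella_mural.py | solve
-- ===== SOURCE A (Python) =====
-- def solve(x, y, string):
--     prev = None
--     cost = 0
--     for char in string:
--         if char == "J":
--             if prev == "C":
--                 cost += x
--             prev = "J"
--         elif char == "C":
--             if prev == "J":
--                 cost += y
--             prev = "C"
--     return cost
-- ===== SOURCE B (Python) =====
-- def solve(x, y, string):
--     s = "".join(c for c in string if c in "JC")
--     return x * s.count("CJ") + y * s.count("JC")
-- ===== Notes on version B (the rewrite author's own statement) =====
-- stated objective: alternative
-- what changed: B computes the result in closed form as x*count('CJ') + y*count('JC') over the joined J/C subsequence using Python's substring counting (valid because these two-character patterns cannot overlap), replacing A's stateful prev/cost accumulator loop.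
import Mathlib
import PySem

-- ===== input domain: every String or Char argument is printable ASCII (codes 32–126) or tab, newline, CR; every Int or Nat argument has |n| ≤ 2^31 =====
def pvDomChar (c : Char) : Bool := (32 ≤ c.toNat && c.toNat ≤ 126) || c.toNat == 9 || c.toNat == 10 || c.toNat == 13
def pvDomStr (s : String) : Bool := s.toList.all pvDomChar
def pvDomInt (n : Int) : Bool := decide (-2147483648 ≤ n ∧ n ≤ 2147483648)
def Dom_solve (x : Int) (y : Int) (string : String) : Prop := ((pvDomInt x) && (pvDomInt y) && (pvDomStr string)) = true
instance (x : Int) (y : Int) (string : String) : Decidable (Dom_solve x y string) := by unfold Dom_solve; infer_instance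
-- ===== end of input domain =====

-- B replaces A's stateful prev/cost accumulator loop with a closed form over the joined J/C
-- subsequence: x * count("CJ") + y * count("JC") via Python substring counting (alternative).

-- ===== PORT A =====
-- one loop step of A: update (prev, cost) by the current character
def solveStep (x : Int) (y : Int) : (Option Char × Int) → Char → (Option Char × Int)
  | (prev, cost), c =>
    if c = 'J' then (some 'J', if prev = some 'C' then cost + x else cost)
    else if c = 'C' then (some 'C', if prev = some 'J' then cost + y else cost)
    else (prev, cost)

def solve (x : Int) (y : Int) (string : String) : Int :=
  (string.toList.foldl (solveStep x y) (none, 0)).2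

-- ===== PORT B =====
-- s = "".join(c for c in string if c in "JC"); return x*s.count("CJ") + y*s.count("JC")
def solve_alt (x : Int) (y : Int) (string : String) : Int :=
  let s : List Char := string.toList.filter (fun c => PySem.Chars.isIn [c] ['J', 'C'])
  x * (PySem.Chars.count s ['C', 'J'] : Int) + y * (PySem.Chars.count s ['J', 'C'] : Int)

-- ===== PRECONDITION & SPEC =====
def Spec_solve (x : Int) (y : Int) (string : String) (out : Int) : Prop := out = solve_alt x y string
instance (x : Int) (y : Int) (string : String) (out : Int) : Decidable (Spec_solve x y string out) := by unfold Spec_solve; infer_instance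

-- ===== CLAIM (what is proved, stated in full; the proofs are below) =====
def Claim_equal_solve : Prop := ∀ (x : Int) (y : Int) (string : String), Dom_solve x y string → Spec_solve x y string (solve x y string)

-- ===== LEMMAS AND PROOFS =====

-- number of adjacent (a,b) pairs in a list
def cnt (a b : Char) : List Char → Nat
  | p :: q :: t => (if p = a ∧ q = b then 1 else 0) + cnt a b (q :: t)
  | _ => 0

-- the single-char membership test of B's filter, spelled out
theorem isIn_single_JC (c : Char) :
    PySem.Chars.isIn [c] ['J', 'C'] = true ↔ (c = 'J' ∨ c = 'C') := by
  rw [PySem.Chars.isIn_iff_infix]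
  constructor
  · intro hinf; have := hinf.subset (by simp : c ∈ [c]); simpa using this
  · rintro (rfl | rfl)
    · exact ⟨[], ['C'], rfl⟩
    · exact ⟨['J'], [], rfl⟩

theorem count_go_nil (sub : List Char) (fuel acc : Nat) :
    PySem.Chars.count.go sub fuel [] acc = acc := by
  cases fuel <;> rfl

-- Python's non-overlapping substring count of a 2-char pattern ab with a ≠ b
-- equals the number of adjacent (a,b) pairs (no occurrence can overlap another).
theorem count_go_pair (a b : Char) (hab : a ≠ b) :
    ∀ (fuel : Nat) (l : List Char) (acc : Nat), l.length ≤ fuel →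
      PySem.Chars.count.go [a, b] fuel l acc = acc + cnt a b l := by
  intro fuel
  induction fuel with
  | zero =>
      intro l acc h
      have : l = [] := List.length_eq_zero_iff.mp (Nat.le_zero.mp h)
      subst this; rfl
  | succ n ih =>
      intro l acc h
      match l with
      | [] => simp [count_go_nil, cnt]
      | [p] =>
          rw [PySem.Chars.count.go]
          have hpre : List.isPrefixOf [a, b] [p] = false := by
            simp [List.isPrefixOf]
          simp [hpre, count_go_nil, cnt]
      | p :: q :: t =>
          rw [PySem.Chars.count.go]
          by_cases hp : p = a ∧ q = b
          · obtain ⟨rfl, rfl⟩ := hp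
            have hpre : List.isPrefixOf [p, q] (p :: q :: t) = true := by
              simp [List.isPrefixOf]
            simp only [hpre, if_true]
            have hlen : t.length ≤ n := by simp at h; omega
            have hdrop : List.drop (List.length [p, q]) (p :: q :: t) = t := by simp
            rw [hdrop, ih t (acc + 1) hlen]
            have hqt : cnt p q (q :: t) = cnt p q t := by
              match t with
              | [] => simp [cnt]
              | r :: t' =>
                  have : ¬ (q = p ∧ r = q) := by
                    rintro ⟨rfl, -⟩; exact hab rfl
                  simp [cnt, this]
            simp [cnt, hqt]
            omega
          · have hpre : List.isPrefixOf [a, b] (p :: q :: t) = false := by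
              rw [Bool.eq_false_iff]
              intro hpref
              obtain ⟨r, hr⟩ := List.isPrefixOf_iff_prefix.mp hpref
              simp only [List.cons_append, List.cons.injEq] at hr
              exact hp ⟨hr.1.symm, hr.2.1.symm⟩
            simp only [hpre, Bool.false_eq_true, if_false]
            have hlen : (q :: t).length ≤ n := Nat.le_of_succ_le_succ (by simpa using h)
            rw [ih (q :: t) acc hlen]
            simp [cnt, hp]

theorem count_pair (a b : Char) (hab : a ≠ b) (l : List Char) :
    PySem.Chars.count l [a, b] = cnt a b l := by
  have : PySem.Chars.count l [a, b] = PySem.Chars.count.go [a, b] l.length l 0 := by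
    rw [PySem.Chars.count]; simp
  rw [this, count_go_pair a b hab l.length l 0 (Nat.le_refl _)]
  simp

-- A's step is the identity on characters other than 'J'/'C'
theorem solveStep_skip (x y : Int) (s : Option Char × Int) (c : Char)
    (h : ¬ (c = 'J' ∨ c = 'C')) : solveStep x y s c = s := by
  obtain ⟨p, k⟩ := s
  rw [not_or] at h
  simp [solveStep, h.1, h.2]

-- A's fold equals the fold over B's filtered list
theorem foldl_filter_JC (x y : Int) (l : List Char) (s : Option Char × Int) :
    l.foldl (solveStep x y) s
      = (l.filter (fun c => PySem.Chars.isIn [c] ['J', 'C'])).foldl (solveStep x y) s := by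
  induction l generalizing s with
  | nil => rfl
  | cons c t ih =>
      by_cases h : PySem.Chars.isIn [c] ['J', 'C'] = true
      · simp only [List.filter, h, List.foldl, ih]
      · have hn : ¬ (c = 'J' ∨ c = 'C') := fun hc => h ((isIn_single_JC c).mpr hc)
        simp only [Bool.not_eq_true] at h
        simp only [List.filter, h, List.foldl, solveStep_skip x y s c hn, ih]

-- core invariant: on an all-J/C list, A's fold from (some p, cost) adds the two pair counts of p::l
theorem fold_eq_counts (x y : Int) (l : List Char) :
    ∀ p cost, (p = 'J' ∨ p = 'C') → (∀ c ∈ l, c = 'J' ∨ c = 'C') →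
    (l.foldl (solveStep x y) (some p, cost)).2
      = cost + x * (cnt 'C' 'J' (p :: l) : Int) + y * (cnt 'J' 'C' (p :: l) : Int) := by
  induction l with
  | nil => intro p cost _ _; simp [cnt]
  | cons b t ih =>
      intro p cost hp hall
      have hb : b = 'J' ∨ b = 'C' := hall b (by simp)
      have ht : ∀ c ∈ t, c = 'J' ∨ c = 'C' := fun c hc => hall c (by simp [hc])
      have hstep : solveStep x y (some p, cost) b
          = (some b, cost + (if p = 'C' ∧ b = 'J' then x else 0)
                          + (if p = 'J' ∧ b = 'C' then y else 0)) := by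
        rcases hp with rfl | rfl <;> rcases hb with rfl | rfl <;> simp [solveStep]
      simp only [List.foldl, hstep]
      rw [ih b _ hb ht]
      have hC : cnt 'C' 'J' (p :: b :: t)
          = (if p = 'C' ∧ b = 'J' then 1 else 0) + cnt 'C' 'J' (b :: t) := by
        simp [cnt]
      have hJ : cnt 'J' 'C' (p :: b :: t)
          = (if p = 'J' ∧ b = 'C' then 1 else 0) + cnt 'J' 'C' (b :: t) := by
        simp [cnt]
      rw [hC, hJ]
      push_cast
      split_ifs <;> ring

-- ===== VERDICT (by name: the statement is the Claim_ definition above) =====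
theorem solve_spec : Claim_equal_solve := by
  intro x y string _
  unfold Spec_solve solve solve_alt
  dsimp only
  rw [foldl_filter_JC,
      count_pair 'C' 'J' (by decide), count_pair 'J' 'C' (by decide)]
  have hall : ∀ c ∈ string.toList.filter (fun c => PySem.Chars.isIn [c] ['J', 'C']),
      c = 'J' ∨ c = 'C' := by
    intro c hc
    exact (isIn_single_JC c).mp ((List.mem_filter.mp hc).2)
  cases hf : string.toList.filter (fun c => PySem.Chars.isIn [c] ['J', 'C']) with
  | nil => simp [cnt, List.foldl]
  | cons a t =>
      have ha : a = 'J' ∨ a = 'C' := hall a (by rw [hf]; simp)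
      have hstep0 : solveStep x y (none, 0) a = (some a, 0) := by
        rcases ha with rfl | rfl <;> simp [solveStep]
      simp only [List.foldl, hstep0]
      rw [fold_eq_counts x y t a 0 ha (fun c hc => hall c (by rw [hf]; simp [hc]))]
      ring
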